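-- pv_equiv track=rewrite | github.com/deepjaindrj/greenwaste-Technex | backend/main.py | determine_category_from_objects
-- ===== SOURCE A (Python) =====
-- HAZARDOUS_LABELS = {"batteries", "e-waste", "paints", "pesticides"}
--
-- NON_RECYCLABLE_LABELS = {"ceramic_product", "diapers", "platics_bags_wrappers", "sanitary_napkin", "stroform_product"}
--
-- ORGANIC_LABELS = {"coffee_tea_bags", "egg_shells", "food_scraps", "kitchen_waste", "yard_trimmings"}
--
-- RECYCLABLE_LABELS = {"cans_all_type", "glass_containers", "paper_products", "plastic_bottles"}
--
-- def determine_category_from_objects(objects: list) -> str: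
--     """
--     Rule engine: map detected YOLO objects → waste category.
--
--     Priority:
--     1. Any hazardous label → "Hazardous"
--     2. Both organic AND recyclable present → "Mixed Waste"
--     3. Only organic → "Organic"
--     4. Only recyclable → "Recyclable"
--     5. Only non-recyclable → "Non-Recyclable"
--     6. Mix of non-recyclable + others → use dominant
--     7. Unknown labels → "Non-Recyclable"
--     """
--     labels = {obj["label"] for obj in objects}
--
--     has_hazardous = bool(labels & HAZARDOUS_LABELS)
--     has_organic = bool(labels & ORGANIC_LABELS)
--     has_recyclable = bool(labels & RECYCLABLE_LABELS)
--     has_non_recyclable = bool(labels & NON_RECYCLABLE_LABELS)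
--
--     # Rule 1: hazardous takes priority
--     if has_hazardous:
--         return "Hazardous"
--
--     # Rule 2: both organic and recyclable → mixed
--     if has_organic and has_recyclable:
--         return "Mixed Waste"
--
--     # Rule 3-4-5: single type
--     if has_organic and not has_recyclable and not has_non_recyclable:
--         return "Organic"
--
--     if has_recyclable and not has_organic and not has_non_recyclable:
--         return "Recyclable"
--
--     if has_non_recyclable and not has_organic and not has_recyclable:
--         return "Non-Recyclable"
--
--     # Organic + non-recyclable
--     if has_organic and has_non_recyclable:
--         return "Mixed Waste"
--
--     # Recyclable + non-recyclable
--     if has_recyclable and has_non_recyclable: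
--         return "Mixed Waste"
--
--     # Fallback: labels exist but do not match any known set
--     return "Non-Recyclable"
-- ===== SOURCE B (Python) =====
-- HAZARDOUS_LABELS = {"batteries", "e-waste", "paints", "pesticides"}
--
-- NON_RECYCLABLE_LABELS = {"ceramic_product", "diapers", "platics_bags_wrappers", "sanitary_napkin", "stroform_product"}
--
-- ORGANIC_LABELS = {"coffee_tea_bags", "egg_shells", "food_scraps", "kitchen_waste", "yard_trimmings"}
--
-- RECYCLABLE_LABELS = {"cans_all_type", "glass_containers", "paper_products", "plastic_bottles"}
--
-- def _group(label):
--     """Map one label to its category group name."""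
--     if label in HAZARDOUS_LABELS:
--         return "hazardous"
--     if label in ORGANIC_LABELS:
--         return "Organic"
--     if label in RECYCLABLE_LABELS:
--         return "Recyclable"
--     if label in NON_RECYCLABLE_LABELS:
--         return "Non-Recyclable"
--     return "unknown"
--
-- def determine_category_from_objects(objects: list) -> str:
--     present = set()
--     for obj in objects:
--         present.add(_group(obj["label"]))
--     if "hazardous" in present:
--         return "Hazardous"
--     names = [g for g in ("Organic", "Recyclable", "Non-Recyclable") if g in present]
--     if len(names) >= 2:
--         return "Mixed Waste"
--     if names:
--         return names[0]
--     return "Non-Recyclable"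
-- ===== Notes on version B (the rewrite author's own statement) =====
-- stated objective: simpler
-- what changed: B replaces A's four set-intersection flags and seven-branch boolean cascade by classifying each detected label once into a group name in a single pass, then dispatching on which of the three non-hazardous groups are present (two or more -> Mixed Waste, exactly one -> its name, none -> Non-Recyclable), with hazardous checked first.
import Mathlib
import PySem

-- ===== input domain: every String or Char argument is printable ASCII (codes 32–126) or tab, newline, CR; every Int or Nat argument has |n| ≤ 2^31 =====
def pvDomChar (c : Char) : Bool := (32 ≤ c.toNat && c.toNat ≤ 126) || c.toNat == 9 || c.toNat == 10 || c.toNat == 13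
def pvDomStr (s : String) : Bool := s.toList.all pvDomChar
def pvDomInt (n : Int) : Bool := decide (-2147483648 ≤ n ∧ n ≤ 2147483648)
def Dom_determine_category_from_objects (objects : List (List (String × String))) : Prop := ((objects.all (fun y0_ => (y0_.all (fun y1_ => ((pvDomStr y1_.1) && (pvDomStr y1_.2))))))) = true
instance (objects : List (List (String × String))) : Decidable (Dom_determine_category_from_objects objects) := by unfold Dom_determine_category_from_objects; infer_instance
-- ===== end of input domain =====

-- B replaces A's seven-branch boolean cascade by a single classification pass plus
-- count-based dispatch over the matched groups (objective: simpler). Equivalence is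
-- about the return value; neither program mutates its argument.

-- ===== PORT A =====
def hazLabels : List String := ["batteries", "e-waste", "paints", "pesticides"]
def nonLabels : List String := ["ceramic_product", "diapers", "platics_bags_wrappers", "sanitary_napkin", "stroform_product"]
def orgLabels : List String := ["coffee_tea_bags", "egg_shells", "food_scraps", "kitchen_waste", "yard_trimmings"]
def recLabels : List String := ["cans_all_type", "glass_containers", "paper_products", "plastic_bottles"]

-- obj["label"]; total form of the dict lookup, exact under Pre_ (key present)
def pvGetLabel (obj : List (String × String)) : String := PySem.Dict.getD (PySem.Dict.ofList obj) "label" ""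

def determine_category_from_objects (objects : List (List (String × String))) : String :=
  let labels : PySem.Set String := PySem.Set.ofList (objects.map (fun obj => pvGetLabel obj))
  let has_hazardous : Bool := !(PySem.Set.inter labels hazLabels).isEmpty
  let has_organic : Bool := !(PySem.Set.inter labels orgLabels).isEmpty
  let has_recyclable : Bool := !(PySem.Set.inter labels recLabels).isEmpty
  let has_non_recyclable : Bool := !(PySem.Set.inter labels nonLabels).isEmpty
  if has_hazardous then "Hazardous"
  else if has_organic && has_recyclable then "Mixed Waste"
  else if has_organic && !has_recyclable && !has_non_recyclable then "Organic"
  else if has_recyclable && !has_organic && !has_non_recyclable then "Recyclable"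
  else if has_non_recyclable && !has_organic && !has_recyclable then "Non-Recyclable"
  else if has_organic && has_non_recyclable then "Mixed Waste"
  else if has_recyclable && has_non_recyclable then "Mixed Waste"
  else "Non-Recyclable"

-- ===== PORT B =====
def pvGroup (label : String) : String :=
  if hazLabels.contains label then "hazardous"
  else if orgLabels.contains label then "Organic"
  else if recLabels.contains label then "Recyclable"
  else if nonLabels.contains label then "Non-Recyclable"
  else "unknown"

def determine_category_from_objects_alt (objects : List (List (String × String))) : String :=
  let present : PySem.Set String :=
    objects.foldl (fun s obj => PySem.Set.add s (pvGroup (pvGetLabel obj))) PySem.Set.empty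
  if PySem.Set.contains present "hazardous" then "Hazardous"
  else
    let names := (["Organic", "Recyclable", "Non-Recyclable"]).filter (fun g => PySem.Set.contains present g)
    if 2 ≤ names.length then "Mixed Waste"
    else match names with
      | g :: _ => g
      | [] => "Non-Recyclable"

-- ===== PRECONDITION & SPEC =====
-- Pre_ excludes objects missing the "label" key, on which A raises KeyError.
def Pre_determine_category_from_objects (objects : List (List (String × String))) : Prop :=
  ∀ obj ∈ objects, PySem.Dict.contains (PySem.Dict.ofList obj) "label" = true
instance (objects : List (List (String × String))) : Decidable (Pre_determine_category_from_objects objects) := by unfold Pre_determine_category_from_objects; infer_instance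

def pvWitness_determine_category_from_objects : (List (List (String × String))) :=
  [[("label", "food_scraps")], [("label", "cans_all_type")]]

def Spec_determine_category_from_objects (objects : List (List (String × String))) (out : String) : Prop := out = determine_category_from_objects_alt objects
instance (objects : List (List (String × String))) (out : String) : Decidable (Spec_determine_category_from_objects objects out) := by unfold Spec_determine_category_from_objects; infer_instance

-- ===== CLAIM (what is proved, stated in full; the proofs are below) =====
def Claim_equal_determine_category_from_objects : Prop := ∀ (objects : List (List (String × String))), Dom_determine_category_from_objects objects → Pre_determine_category_from_objects objects → Spec_determine_category_from_objects objects (determine_category_from_objects objects)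

-- ===== LEMMAS AND PROOFS =====

-- the four "has_X" booleans of A, as any-scans over the label list
def pvHas (X : List String) (objects : List (List (String × String))) : Bool :=
  objects.any (fun obj => X.contains (pvGetLabel obj))

theorem pvInter_isEmpty (objects : List (List (String × String))) (X : List String) :
    (!(PySem.Set.inter (PySem.Set.ofList (objects.map (fun obj => pvGetLabel obj))) X).isEmpty)
      = pvHas X objects := by
  rw [Bool.eq_iff_iff]
  simp [List.eq_nil_iff_forall_not_mem, PySem.Set.mem_inter,
        PySem.Set.mem_ofList, pvHas, List.any_eq_true]

theorem pvGroup_haz (l : String) : (pvGroup l = "hazardous") ↔ l ∈ hazLabels := by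
  unfold pvGroup
  split_ifs with h1 h2 h3 h4 <;> simp_all [hazLabels, orgLabels, recLabels, nonLabels]

theorem pvGroup_mem_iff (objects : List (List (String × String))) (g : String) :
    (PySem.Set.contains
      (objects.foldl (fun s obj => PySem.Set.add s (pvGroup (pvGetLabel obj))) PySem.Set.empty) g)
      = objects.any (fun obj => pvGroup (pvGetLabel obj) == g) := by
  rw [Bool.eq_iff_iff, PySem.Set.contains_iff, List.any_eq_true, PySem.Set.mem_foldl_add]
  simp only [PySem.Set.empty, List.not_mem_nil, false_or, beq_iff_eq]
  exact ⟨fun ⟨b, hb, h⟩ => ⟨b, hb, h.symm⟩, fun ⟨b, hb, h⟩ => ⟨b, hb, h.symm⟩⟩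

theorem pvAny_congr (objects : List (List (String × String))) (f g : List (String × String) → Bool)
    (h : ∀ obj, f obj = g obj) : objects.any f = objects.any g := by
  simp [funext h]

theorem pvGroup_eq_iff (l : String) (g : String) (X : List String)
    (hg : ∀ l', (pvGroup l' = g) ↔ l' ∈ X) : (pvGroup l == g) = X.contains l := by
  rw [Bool.eq_iff_iff]; simp [hg l]

theorem pvGroup_org (l : String) : (pvGroup l = "Organic") ↔ l ∈ orgLabels := by
  unfold pvGroup
  split_ifs with h1 h2 h3 h4 <;> simp_all [hazLabels, orgLabels, recLabels, nonLabels] <;>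
    rcases h1 with rfl|rfl|rfl|rfl <;> decide

theorem pvGroup_rec (l : String) : (pvGroup l = "Recyclable") ↔ l ∈ recLabels := by
  unfold pvGroup
  split_ifs with h1 h2 h3 h4 <;> simp_all [hazLabels, orgLabels, recLabels, nonLabels]  <;>
    first
      | (rcases h1 with rfl|rfl|rfl|rfl <;> decide)
      | (rcases h2 with rfl|rfl|rfl|rfl|rfl <;> decide)

theorem pvGroup_non (l : String) : (pvGroup l = "Non-Recyclable") ↔ l ∈ nonLabels := by
  unfold pvGroup
  split_ifs with h1 h2 h3 h4 <;> simp_all [hazLabels, orgLabels, recLabels, nonLabels]  <;>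
    first
      | (rcases h1 with rfl|rfl|rfl|rfl <;> decide)
      | (rcases h2 with rfl|rfl|rfl|rfl|rfl <;> decide)
      | (rcases h3 with rfl|rfl|rfl|rfl <;> decide)

-- ===== VERDICT (by name: the statement is the Claim_ definition above) =====
theorem determine_category_from_objects_spec : Claim_equal_determine_category_from_objects := by
  intro objects _ _
  unfold Spec_determine_category_from_objects determine_category_from_objects determine_category_from_objects_alt
  simp only [pvInter_isEmpty, pvGroup_mem_iff, List.filter_cons, List.filter_nil]
  rw [pvAny_congr objects _ _ (fun l => pvGroup_eq_iff _ "hazardous" hazLabels pvGroup_haz),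
      pvAny_congr objects _ _ (fun l => pvGroup_eq_iff _ "Organic" orgLabels pvGroup_org),
      pvAny_congr objects _ _ (fun l => pvGroup_eq_iff _ "Recyclable" recLabels pvGroup_rec),
      pvAny_congr objects _ _ (fun l => pvGroup_eq_iff _ "Non-Recyclable" nonLabels pvGroup_non)]
  simp only [pvHas]
  rcases Bool.dichotomy (objects.any fun l => hazLabels.contains (pvGetLabel l)) with hH | hH <;>
  rcases Bool.dichotomy (objects.any fun l => orgLabels.contains (pvGetLabel l)) with hO | hO <;>
  rcases Bool.dichotomy (objects.any fun l => recLabels.contains (pvGetLabel l)) with hR | hR <;>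
  rcases Bool.dichotomy (objects.any fun l => nonLabels.contains (pvGetLabel l)) with hN | hN <;>
    simp only [hH, hO, hR, hN] <;> rfl
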